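-- pv_equiv track=rewrite | github.com/devcxl/cloudflare-archlinux-repo | check_aur_updates.py | parse_arch_version
-- ===== SOURCE A (Python) =====
-- def parse_arch_version(version_string):
--     """
--     Parse Arch Linux package version string.
--
--     Arch version format: [epoch:]pkgver-pkgrel
--     - epoch: Optional epoch number (defaults to 0)
--     - pkgver: Package version (e.g., 1.2.3, 1.2.3.r1.g1234abc)
--     - pkgrel: Package release number
--
--     Returns a tuple: (epoch, pkgver_parts, pkgrel)
--     """
--     # Handle epoch prefix
--     if ':' in version_string:
--         epoch_str, version_string = version_string.split(':', 1)
--         try: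
--             epoch = int(epoch_str)
--         except ValueError:
--             epoch = 0
--     else:
--         epoch = 0
--
--     # Split pkgver and pkgrel
--     if '-' in version_string:
--         # Last hyphen is pkgver-pkgrel separator
--         parts = version_string.rsplit('-', 1)
--         pkgver = parts[0]
--         try:
--             pkgrel = int(parts[1])
--         except ValueError:
--             pkgrel = 0
--     else:
--         pkgver = version_string
--         pkgrel = 0
--
--     # Parse pkgver into comparable parts
--     pkgver_parts = []
--     current = ''
--     for char in pkgver:
--         if char.isalpha():
--             if current:
--                 pkgver_parts.append((0, current))
--                 current = ''
--             pkgver_parts.append((1, char))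
--         elif char.isdigit():
--             current += char
--         else:
--             if current:
--                 pkgver_parts.append((0, current))
--                 current = ''
--             pkgver_parts.append((2, char))
--     if current:
--         pkgver_parts.append((0, current))
--
--     return (epoch, pkgver_parts, pkgrel)
-- ===== SOURCE B (Python) =====
-- def _int_or_zero(s):
--     try:
--         return int(s)
--     except ValueError:
--         return 0
--
--
-- def parse_arch_version(version_string):
--     """
--     Parse Arch Linux package version string [epoch:]pkgver-pkgrel into
--     (epoch, pkgver_parts, pkgrel), done in stages: partition off the epoch and
--     the pkgrel, then compute the token START POSITIONS of pkgver (every index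
--     that is not a digit continuing a digit run) and slice/classify between them.
--     """
--     head, sep, tail = version_string.partition(':')
--     if sep:
--         epoch, rest = _int_or_zero(head), tail
--     else:
--         epoch, rest = 0, version_string
--
--     pkgver, dash, relstr = rest.rpartition('-')
--     if dash:
--         pkgrel = _int_or_zero(relstr)
--     else:
--         pkgver, pkgrel = rest, 0
--
--     starts = [i for i, c in enumerate(pkgver)
--               if i == 0 or not c.isdigit() or not pkgver[i - 1].isdigit()]
--
--     parts = []
--     for j, i in enumerate(starts):
--         c = pkgver[i]
--         if c.isdigit():
--             end = starts[j + 1] if j + 1 < len(starts) else len(pkgver)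
--             parts.append((0, pkgver[i:end]))
--         elif c.isalpha():
--             parts.append((1, c))
--         else:
--             parts.append((2, c))
--     return (epoch, parts, pkgrel)
-- ===== Notes on version B (the rewrite author's own statement) =====
-- stated objective: alternative
-- what changed: A's single character-by-character pass with a mutable digit buffer and flush-at-boundary logic is replaced by staged passes: partition/rpartition for the epoch and pkgrel splits, then a first pass computing the token start positions of pkgver (indices that do not continue a digit run) and a second pass slicing and classifying pkgver between consecutive start positions.
import Mathlib
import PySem

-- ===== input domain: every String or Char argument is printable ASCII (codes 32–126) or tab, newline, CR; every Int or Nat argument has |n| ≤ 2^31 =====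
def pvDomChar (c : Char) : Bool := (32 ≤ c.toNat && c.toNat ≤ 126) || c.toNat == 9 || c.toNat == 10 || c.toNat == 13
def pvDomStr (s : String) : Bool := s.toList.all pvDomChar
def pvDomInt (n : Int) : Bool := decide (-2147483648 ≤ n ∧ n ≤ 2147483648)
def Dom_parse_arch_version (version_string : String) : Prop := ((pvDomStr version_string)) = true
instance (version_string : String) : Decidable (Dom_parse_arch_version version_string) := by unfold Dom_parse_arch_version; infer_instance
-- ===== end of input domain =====

-- B restructures A: partition/rpartition instead of guarded split/rsplit, and the pkgver tokenizer
-- becomes two stages (compute token start positions, then slice/classify between them) instead of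
-- A's character-by-character digit-buffer loop. Objective: alternative decomposition, same cost.

-- ===== PORT A =====
-- version_string.split(':', 1) guarded by ':' in version_string, with try: int(...) except ValueError: epoch = 0
def pvEpochSplitA (cs : List Char) : Int × List Char :=
  if PySem.Chars.isIn [':'] cs then
    match PySem.Chars.splitMax? cs [':'] 1 with
    | some (e :: rest :: _) => ((PySem.Int.ofChars? e).getD 0, rest)
    | _ => (0, cs)  -- unreachable: sep ≠ "" and ':' present give exactly two pieces
  else (0, cs)

-- version_string.rsplit('-', 1): split at the LAST '-' (rfind; exact, '-' present by the guard), int with ValueError → 0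
def pvRelSplitA (cs : List Char) : List Char × Int :=
  if PySem.Chars.isIn ['-'] cs then
    (cs.take (PySem.Chars.rfind cs ['-']).toNat,
     (PySem.Int.ofChars? (cs.drop ((PySem.Chars.rfind cs ['-']).toNat + 1))).getD 0)
  else (cs, 0)

-- 'if current: pkgver_parts.append((0, current))'
def pvFlushA (parts : List (Int × String)) (cur : List Char) : List (Int × String) :=
  if cur.isEmpty then parts else parts ++ [(0, String.ofList cur)]

-- the body of A's 'for char in pkgver' loop; state = (pkgver_parts, current)
def pvStepA (st : List (Int × String) × List Char) (c : Char) : List (Int × String) × List Char :=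
  if PySem.Chars.isalpha c then (pvFlushA st.1 st.2 ++ [(1, String.ofList [c])], [])
  else if PySem.Chars.isdigit c then (st.1, st.2 ++ [c])
  else (pvFlushA st.1 st.2 ++ [(2, String.ofList [c])], [])

def parse_arch_version (version_string : String) : Int × (List (Int × String)) × Int :=
  let (epoch, cs) := pvEpochSplitA version_string.toList
  let (pkgver, pkgrel) := pvRelSplitA cs
  let st := pkgver.foldl pvStepA ([], [])
  (epoch, pvFlushA st.1 st.2, pkgrel)

-- ===== PORT B =====
-- def _int_or_zero(s): try: return int(s) except ValueError: return 0
def pvIntOrZeroB (cs : List Char) : Int := (PySem.Int.ofChars? cs).getD 0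

-- head, sep, tail = version_string.partition(':'); if sep: — sep ≠ '' iff ':' occurs; partition slices at the FIRST ':'
def pvPartB (cs : List Char) : Int × List Char :=
  if PySem.Chars.isIn [':'] cs then
    (pvIntOrZeroB (cs.take (PySem.Chars.find cs [':']).toNat),
     cs.drop ((PySem.Chars.find cs [':']).toNat + 1))
  else (0, cs)

-- pkgver, dash, relstr = rest.rpartition('-'); if dash: — dash ≠ '' iff '-' occurs; rpartition slices at the LAST '-'
def pvRPartB (cs : List Char) : List Char × Int :=
  if PySem.Chars.isIn ['-'] cs then
    (cs.take (PySem.Chars.rfind cs ['-']).toNat,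
     pvIntOrZeroB (cs.drop ((PySem.Chars.rfind cs ['-']).toNat + 1)))
  else (cs, 0)

-- starts = [i for i, c in enumerate(pkgver) if i == 0 or not c.isdigit() or not pkgver[i-1].isdigit()]
-- (pkgver[i-1] only matters when i ≥ 1, where it is in range, so plain getD is exact)
def pvStartsB (cs : List Char) : List Nat :=
  (PySem.List.enumerate cs).filterMap (fun ic =>
    if ic.1 == 0 || !(PySem.Chars.isdigit ic.2) || !(PySem.Chars.isdigit (cs.getD (ic.1 - 1).toNat ' '))
    then some ic.1.toNat else none)

-- the 'for j, i in enumerate(starts)' loop; 'starts[j+1] if j+1 < len(starts) else len(pkgver)' is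
-- the head of the remaining starts (or len); pkgver[i:end] is drop/take
def pvEmitB (cs : List Char) : List Nat → List (Int × String)
  | [] => []
  | i :: rest =>
    let c := cs.getD i ' '
    (if PySem.Chars.isdigit c then
      let e := match rest with | j :: _ => j | [] => cs.length
      ((0 : Int), String.ofList ((cs.drop i).take (e - i)))
    else if PySem.Chars.isalpha c then ((1 : Int), String.ofList [c])
    else ((2 : Int), String.ofList [c])) :: pvEmitB cs rest

def parse_arch_version_alt (version_string : String) : Int × (List (Int × String)) × Int :=
  let (epoch, rest) := pvPartB version_string.toList
  let (pkgver, pkgrel) := pvRPartB rest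
  (epoch, pvEmitB pkgver (pvStartsB pkgver), pkgrel)

-- ===== PRECONDITION & SPEC =====
def Spec_parse_arch_version (version_string : String) (out : Int × (List (Int × String)) × Int) : Prop := out = parse_arch_version_alt version_string
instance (version_string : String) (out : Int × (List (Int × String)) × Int) : Decidable (Spec_parse_arch_version version_string out) := by unfold Spec_parse_arch_version; infer_instance

-- ===== CLAIM (what is proved, stated in full; the proofs are below) =====
def Claim_equal_parse_arch_version : Prop := ∀ (version_string : String), Dom_parse_arch_version version_string → Spec_parse_arch_version version_string (parse_arch_version version_string)

-- ===== LEMMAS AND PROOFS =====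

-- PySem's isdigit/isalpha are disjoint, so A's isalpha-first and B's isdigit-first branchings agree
theorem isdigit_not_isalpha (c : Char) (h : PySem.Chars.isdigit c = true) :
    PySem.Chars.isalpha c = false := by
  simp [PySem.Chars.isdigit] at h
  simp [PySem.Chars.isalpha, PySem.Chars.isupper, PySem.Chars.islower]
  exact ⟨fun hc => absurd (le_trans hc h.2) (by decide),
         fun hc => absurd (le_trans hc h.2) (by decide)⟩

-- ---- the common token spec: maximal digit runs, single non-digit chars ----

def pvTok1 (c : Char) : Int × String :=
  if PySem.Chars.isalpha c then (1, String.ofList [c]) else (2, String.ofList [c])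

def pvGroups : List Char → List (Bool × List Char)
  | [] => []
  | c :: rest =>
    let k := PySem.Chars.isdigit c
    (k, c :: rest.takeWhile (fun d => PySem.Chars.isdigit d == k)) ::
      pvGroups (rest.dropWhile (fun d => PySem.Chars.isdigit d == k))
termination_by cs => cs.length
decreasing_by
  exact Nat.lt_succ_of_le (List.length_dropWhile_le _ _)

def pvRuns (cs : List Char) : List (Int × String) :=
  (pvGroups cs).flatMap (fun g => if g.1 then [((0 : Int), String.ofList g.2)] else g.2.map pvTok1)

-- ---- A's loop equals pvRuns ----

-- proof-side recursive characterization of A's tokenizer loop (pending digit buffer = first arg)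
def pvTok (cur : List Char) : List Char → List (Int × String)
  | [] => if cur.isEmpty then [] else [(0, String.ofList cur)]
  | c :: cs =>
    if PySem.Chars.isalpha c then
      (if cur.isEmpty then [] else [(0, String.ofList cur)]) ++ (1, String.ofList [c]) :: pvTok [] cs
    else if PySem.Chars.isdigit c then pvTok (cur ++ [c]) cs
    else (if cur.isEmpty then [] else [(0, String.ofList cur)]) ++ (2, String.ofList [c]) :: pvTok [] cs

theorem foldA_eq_pvTok (cs : List Char) :
    ∀ parts cur, pvFlushA (cs.foldl pvStepA (parts, cur)).1 (cs.foldl pvStepA (parts, cur)).2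
      = parts ++ pvTok cur cs := by
  induction cs with
  | nil => intro parts cur; simp only [List.foldl_nil, pvTok, pvFlushA]; split <;> simp
  | cons c cs ih =>
    intro parts cur
    simp only [List.foldl_cons, pvStepA]
    by_cases h1 : PySem.Chars.isalpha c
    · rw [if_pos h1, ih, pvTok, if_pos h1]
      by_cases hc : cur.isEmpty <;> simp [pvFlushA, hc]
    · by_cases h2 : PySem.Chars.isdigit c
      · rw [if_neg h1, if_pos h2, ih, pvTok, if_neg h1, if_pos h2]
      · rw [if_neg h1, if_neg h2, ih, pvTok, if_neg h1, if_neg h2]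
        by_cases hc : cur.isEmpty <;> simp [pvFlushA, hc]

-- with a nonempty digit buffer, A's loop emits the whole digit run as one (0, _) token
theorem pvTok_digit_run (cs : List Char) :
    ∀ cur, cur ≠ [] →
      pvTok cur cs = (0, String.ofList (cur ++ cs.takeWhile PySem.Chars.isdigit))
        :: pvTok [] (cs.dropWhile PySem.Chars.isdigit) := by
  induction cs with
  | nil => intro cur h; simp [pvTok, h]
  | cons c cs ih =>
    intro cur h
    by_cases hd : PySem.Chars.isdigit c
    · rw [pvTok]
      simp only [isdigit_not_isalpha c hd, hd, Bool.false_eq_true, if_false, if_true]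
      rw [ih (cur ++ [c]) (by simp), List.takeWhile_cons_of_pos hd,
        List.dropWhile_cons_of_pos hd]
      simp
    · rw [pvTok, List.takeWhile_cons_of_neg hd, List.dropWhile_cons_of_neg hd]
      have hne : cur.isEmpty = false := by simpa using h
      rw [pvTok]
      by_cases ha : PySem.Chars.isalpha c <;> simp [ha, hd, hne]

-- a non-digit head contributes its own token; the rest of its group regroups identically
theorem runs_cons_nondigit (c : Char) (rest : List Char)
    (h : PySem.Chars.isdigit c = false) :
    pvRuns (c :: rest) = pvTok1 c :: pvRuns rest := by
  cases rest with
  | nil => simp [pvRuns, pvGroups, h]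
  | cons d rs =>
    by_cases hd : PySem.Chars.isdigit d
    · rw [pvRuns, pvGroups]
      rw [List.takeWhile_cons_of_neg (by simp [hd, h]),
        List.dropWhile_cons_of_neg (by simp [hd, h])]
      simp [pvRuns, h]
    · rw [pvRuns, pvGroups]
      rw [show (PySem.Chars.isdigit c) = false from h]
      rw [List.takeWhile_cons_of_pos (by simp [hd, h]),
        List.dropWhile_cons_of_pos (by simp [hd, h])]
      conv_rhs => rw [pvRuns, pvGroups]
      rw [show (PySem.Chars.isdigit d) = false from by simpa using hd]
      simp [h]

theorem pvTok_nil_eq_runs (cs : List Char) : pvTok [] cs = pvRuns cs := by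
  induction hn : cs.length using Nat.strong_induction_on generalizing cs with
  | _ n ih =>
    cases cs with
    | nil => simp [pvTok, pvRuns, pvGroups]
    | cons c rest =>
      by_cases hd : PySem.Chars.isdigit c
      · rw [pvTok]
        simp only [isdigit_not_isalpha c hd, hd, Bool.false_eq_true, if_false, if_true,
          List.nil_append]
        rw [pvTok_digit_run rest [c] (by simp)]
        rw [pvRuns, pvGroups]
        rw [show (PySem.Chars.isdigit c) = true from hd]
        have hlen : (rest.dropWhile PySem.Chars.isdigit).length < n := by
          have := List.length_dropWhile_le PySem.Chars.isdigit rest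
          simp at hn
          omega
        rw [ih _ hlen _ rfl]
        have hTW : rest.takeWhile (fun d => PySem.Chars.isdigit d == true)
            = rest.takeWhile PySem.Chars.isdigit := by simp
        have hDW : rest.dropWhile (fun d => PySem.Chars.isdigit d == true)
            = rest.dropWhile PySem.Chars.isdigit := by simp
        rw [hTW, hDW]
        simp [pvRuns]
      · rw [runs_cons_nondigit c rest (by simpa using hd)]
        rw [pvTok]
        have hlen : rest.length < n := by simp at hn; omega
        rw [← ih _ hlen _ rfl]
        by_cases ha : PySem.Chars.isalpha c <;> simp [ha, hd, pvTok1]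

-- ---- the two epoch splits agree: split(':',1) vs partition(':') ----

theorem find_go_single (c : Char) (l : List Char) : ∀ k : Nat,
    PySem.Chars.find.go [c] l k =
      if l.contains c then ((k : Int) + (l.takeWhile (· ≠ c)).length) else -1 := by
  induction l with
  | nil => intro k; simp [PySem.Chars.find.go]
  | cons a l ih =>
    intro k
    by_cases h : a = c
    · subst h
      simp [PySem.Chars.find.go, List.isPrefixOf]
    · rw [PySem.Chars.find.go]
      have hpre : [c].isPrefixOf (a :: l) = false := by
        simp [List.isPrefixOf]
        exact fun hh => (h hh.symm).elim
      rw [hpre]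
      simp only [Bool.false_eq_true, if_false, ih]
      rw [List.takeWhile_cons_of_pos (by simp [h])]
      have : (a :: l).contains c = l.contains c := by simp [Ne.symm h]
      rw [this]
      split
      · simp only [List.length_cons]
        push_cast
        ring
      · rfl

theorem find_single (c : Char) (l : List Char) :
    PySem.Chars.find l [c] =
      if l.contains c then (((l.takeWhile (· ≠ c)).length : Int)) else -1 := by
  have := find_go_single c l 0
  simpa [PySem.Chars.find] using this

-- splitOnMax.go with maxsplit exhausted returns the remainder as the last piece
theorem go_zero (c : Char) (fuel : Nat) (l cur : List Char) (acc : List (List Char)) :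
    PySem.Chars.splitOnMax.go [c] fuel 0 l cur acc = ((cur.reverse ++ l) :: acc).reverse := by
  cases fuel with
  | zero => rw [PySem.Chars.splitOnMax.go]
  | succ fuel =>
    cases l with
    | nil =>
      rw [PySem.Chars.splitOnMax.go]
      all_goals first
        | omega
        | simp
    | cons a l =>
      rw [PySem.Chars.splitOnMax.go]
      all_goals first
        | omega
        | simp

-- splitOnMax.go with maxsplit 1 splits at the first occurrence of c
theorem go_one (c : Char) : ∀ (fuel : Nat) (l cur : List Char) (acc : List (List Char)),
    l.length < fuel →
    PySem.Chars.splitOnMax.go [c] fuel 1 l cur acc = acc.reverse ++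
      (if l.contains c then [cur.reverse ++ l.takeWhile (· ≠ c), (l.dropWhile (· ≠ c)).drop 1]
       else [cur.reverse ++ l]) := by
  intro fuel
  induction fuel with
  | zero => intro l cur acc h; omega
  | succ fuel ih =>
    intro l cur acc h
    cases l with
    | nil =>
      rw [PySem.Chars.splitOnMax.go]
      all_goals first
        | omega
        | simp
    | cons a l =>
      rw [PySem.Chars.splitOnMax.go]
      by_cases hac : a = c
      · subst hac
        have hpre : [a].isPrefixOf (a :: l) = true := by simp [List.isPrefixOf]
        rw [if_neg (by omega), if_pos hpre]
        simp only [List.length_cons, List.length_nil, List.drop_succ_cons, List.drop_zero]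
        rw [show (1 : Nat) - 1 = 0 from rfl, go_zero]
        rw [List.takeWhile_cons_of_neg (by simp), List.dropWhile_cons_of_neg (by simp)]
        simp
      · have hpre : [c].isPrefixOf (a :: l) = false := by
          simp [List.isPrefixOf]
          exact fun hh => (hac hh.symm).elim
        rw [if_neg (by omega), hpre]
        simp only [Bool.false_eq_true, if_false]
        rw [ih l (a :: cur) acc (by simpa using Nat.lt_of_succ_lt_succ h)]
        rw [List.takeWhile_cons_of_pos (by simp [hac]), List.dropWhile_cons_of_pos (by simp [hac])]
        have : (a :: l).contains c = l.contains c := by simp [Ne.symm hac]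
        rw [this]
        split <;> simp

theorem drop_takeWhile_len (p : Char → Bool) : ∀ cs : List Char,
    cs.drop ((cs.takeWhile p).length) = cs.dropWhile p := by
  intro cs
  induction cs with
  | nil => rfl
  | cons a l ih =>
    by_cases hp : p a
    · rw [List.takeWhile_cons_of_pos hp, List.dropWhile_cons_of_pos hp, List.length_cons,
        List.drop_succ_cons, ih]
    · rw [List.takeWhile_cons_of_neg hp, List.dropWhile_cons_of_neg hp]
      rfl

theorem isIn_single_iff_contains (c : Char) (l : List Char) :
    PySem.Chars.isIn [c] l = l.contains c := by
  rw [PySem.Chars.isIn, PySem.Chars.find, find_go_single c l 0]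
  cases hc : l.contains c
  · simp
  · simp

theorem epoch_eq (cs : List Char) : pvEpochSplitA cs = pvPartB cs := by
  unfold pvEpochSplitA pvPartB
  by_cases h : PySem.Chars.isIn [':'] cs
  · have hc : cs.contains ':' = true := by rw [← isIn_single_iff_contains]; exact h
    rw [if_pos h, if_pos h]
    have hsplit : PySem.Chars.splitMax? cs [':'] 1 =
        some [cs.takeWhile (· ≠ ':'), (cs.dropWhile (· ≠ ':')).drop 1] := by
      rw [PySem.Chars.splitMax?, if_neg (by simp), PySem.Chars.splitOnMax, if_neg (by omega)]
      rw [show ((1 : Int)).toNat = 1 from rfl, go_one ':' (cs.length + 1) cs [] [] (by omega)]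
      simp [hc, List.contains_iff_mem.mp hc]
    rw [hsplit]
    have hfind : (PySem.Chars.find cs [':']).toNat = (cs.takeWhile (· ≠ ':')).length := by
      rw [find_single, if_pos hc]; simp
    have htake : cs.take (cs.takeWhile (· ≠ ':')).length = cs.takeWhile (· ≠ ':') :=
      (List.prefix_iff_eq_take.mp (List.takeWhile_prefix _)).symm
    have hdrop : cs.drop ((cs.takeWhile (· ≠ ':')).length + 1) = (cs.dropWhile (· ≠ ':')).drop 1 := by
      rw [← drop_takeWhile_len (· ≠ ':') cs, List.drop_drop]
    rw [hfind, htake, hdrop]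
    rfl
  · rw [if_neg h, if_neg h]

-- ---- B's starts/emit pipeline equals pvRuns ----

-- recursive characterization of the start positions: emit off unless a digit continues a digit run
def pvS (prev : Bool) (off : Nat) : List Char → List Nat
  | [] => []
  | c :: cs =>
    (if prev && PySem.Chars.isdigit c then [] else [off]) ++ pvS (PySem.Chars.isdigit c) (off + 1) cs

def pvPrev (cs : List Char) (off : Nat) : Bool :=
  if off = 0 then false else PySem.Chars.isdigit (cs.getD (off - 1) ' ')

-- the head of a dropWhile result fails the predicate
theorem dropWhile_cons_false (p : Char → Bool) : ∀ (l : List Char) (r : Char) (rs : List Char),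
    l.dropWhile p = r :: rs → p r = false := by
  intro l
  induction l with
  | nil => intro r rs h; simp at h
  | cons a l ih =>
    intro r rs h
    by_cases hp : p a
    · rw [List.dropWhile_cons_of_pos hp] at h
      exact ih r rs h
    · rw [List.dropWhile_cons_of_neg hp] at h
      cases h
      simpa using hp

theorem starts_suffix (cs : List Char) : ∀ (suf : List Char) (off : Nat), cs.drop off = suf →
    (PySem.List.enumerate suf (off : Int)).filterMap (fun ic =>
      if ic.1 == 0 || !(PySem.Chars.isdigit ic.2) || !(PySem.Chars.isdigit (cs.getD (ic.1 - 1).toNat ' '))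
      then some ic.1.toNat else none) = pvS (pvPrev cs off) off suf := by
  intro suf
  induction suf with
  | nil => intro off h; simp [PySem.List.enumerate_nil, pvS]
  | cons c suf ih =>
    intro off h
    have hsome : cs[off]? = some c := by
      have h0 : (cs.drop off)[0]? = cs[off + 0]? := List.getElem?_drop ..
      rw [h, Nat.add_zero] at h0
      exact h0.symm
    have hdrop : cs.drop (off + 1) = suf := by
      rw [← List.tail_drop, h]
      rfl
    have hprev1 : pvPrev cs (off + 1) = PySem.Chars.isdigit c := by
      simp [pvPrev, List.getD_eq_getElem?_getD, hsome]
    rw [PySem.List.enumerate_cons, List.filterMap_cons]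
    have hc1 : ((off : Int) + 1) = (((off + 1 : Nat)) : Int) := by push_cast; ring
    rw [hc1, ih (off + 1) hdrop, hprev1]
    cases off with
    | zero => simp [pvS, pvPrev]
    | succ n =>
      have hcond : ((((n + 1 : Nat)) : Int) == 0) = false := by
        simp
        omega
      have htn : ((((n + 1 : Nat)) : Int) - 1).toNat = n := by omega
      have htn2 : ((((n + 1 : Nat)) : Int)).toNat = n + 1 := by omega
      have hprev : pvPrev cs (n + 1) = PySem.Chars.isdigit (cs.getD n ' ') := by
        simp [pvPrev]
      rw [pvS, hprev]
      simp only [hcond, Bool.false_or, htn, htn2]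
      cases hdg : PySem.Chars.isdigit c <;> cases hpv : PySem.Chars.isdigit (cs.getD n ' ') <;>
        simp [hdg, hpv]

theorem starts_eq_pvS (cs : List Char) : pvStartsB cs = pvS false 0 cs := by
  have := starts_suffix cs cs 0 rfl
  simpa [pvStartsB, pvPrev] using this

-- pvS skips over the continuation of a digit run
theorem pvS_skip_digits : ∀ (ds rest : List Char) (off : Nat),
    (∀ d ∈ ds, PySem.Chars.isdigit d = true) →
    pvS true off (ds ++ rest) = pvS true (off + ds.length) rest := by
  intro ds
  induction ds with
  | nil => intro rest off _; simp
  | cons d ds ih =>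
    intro rest off h
    rw [List.cons_append, pvS, h d List.mem_cons_self,
      ih rest (off + 1) (fun x hx => h x (List.mem_cons_of_mem _ hx))]
    have heq : off + 1 + ds.length = off + (d :: ds).length := by
      simp only [List.length_cons]
      omega
    rw [heq]
    simp

-- at a run boundary (head non-digit, or empty) pvS does not depend on prev
theorem pvS_boundary (rest : List Char) (off : Nat)
    (h : ∀ r rs, rest = r :: rs → PySem.Chars.isdigit r = false) :
    pvS true off rest = pvS false off rest := by
  cases rest with
  | nil => rfl
  | cons r rs =>
    rw [pvS, pvS, h r rs rfl]
    simp

theorem pvEmitB_cons (cs : List Char) (i : Nat) (rest : List Nat) :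
    pvEmitB cs (i :: rest) =
      (if PySem.Chars.isdigit (cs.getD i ' ') then
        ((0 : Int), String.ofList ((cs.drop i).take
          ((match rest with | j :: _ => j | [] => cs.length) - i)))
      else if PySem.Chars.isalpha (cs.getD i ' ') then ((1 : Int), String.ofList [cs.getD i ' '])
      else ((2 : Int), String.ofList [cs.getD i ' '])) :: pvEmitB cs rest := rfl

theorem emit_eq_runs (cs : List Char) : ∀ (n : Nat) (suf : List Char) (off : Nat),
    suf.length ≤ n → cs.drop off = suf →
    pvEmitB cs (pvS false off suf) = pvRuns suf := by
  intro n
  induction n with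
  | zero =>
    intro suf off h1 h2
    have : suf = [] := List.eq_nil_of_length_eq_zero (by omega)
    subst this
    simp [pvS, pvEmitB, pvRuns, pvGroups]
  | succ n ih =>
    intro suf off h1 h2
    cases suf with
    | nil => simp [pvS, pvEmitB, pvRuns, pvGroups]
    | cons c suf =>
      have hsome : cs[off]? = some c := by
        have h0 : (cs.drop off)[0]? = cs[off + 0]? := List.getElem?_drop ..
        rw [h2, Nat.add_zero] at h0
        exact h0.symm
      have hget : cs.getD off ' ' = c := by
        simp [List.getD_eq_getElem?_getD, hsome]
      have hoffle : off ≤ cs.length := by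
        by_contra hlt
        have hnil : cs.drop off = [] := List.drop_eq_nil_of_le (by omega)
        rw [h2] at hnil
        simp at hnil
      rw [pvS]
      simp only [Bool.false_and, Bool.false_eq_true, if_false, List.singleton_append]
      by_cases hd : PySem.Chars.isdigit c
      · -- digit run: run = c :: takeWhile, rest = dropWhile
        set tw := suf.takeWhile PySem.Chars.isdigit with htw
        set dw := suf.dropWhile PySem.Chars.isdigit with hdw
        have hsplitsuf : suf = tw ++ dw := (List.takeWhile_append_dropWhile).symm
        have htwdig : ∀ d ∈ tw, PySem.Chars.isdigit d = true := fun d hd' =>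
          List.mem_takeWhile_imp hd'
        have hdwhead : ∀ r rs, dw = r :: rs → PySem.Chars.isdigit r = false := by
          intro r rs hr
          exact dropWhile_cons_false _ suf r rs (by rw [← hdw, hr])
        have hS : pvS (PySem.Chars.isdigit c) (off + 1) suf
            = pvS false (off + (tw.length + 1)) dw := by
          rw [hd]
          conv_lhs => rw [hsplitsuf]
          rw [pvS_skip_digits tw dw (off + 1) htwdig]
          rw [pvS_boundary dw _ hdwhead]
          congr 1
          omega
        rw [hS, pvEmitB_cons, hget]
        simp only [hd, if_true]
        have hdropoff : cs.drop off = (c :: tw) ++ dw := by rw [h2, hsplitsuf]; rfl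
        have hdropnext : cs.drop (off + (tw.length + 1)) = dw := by
          have h5 : (cs.drop off).drop ((c :: tw).length) = dw := by
            rw [hdropoff]
            exact List.drop_left
          rw [List.drop_drop] at h5
          simpa using h5
        have hlen : dw.length ≤ n := by
          have := List.length_dropWhile_le PySem.Chars.isdigit suf
          rw [← hdw] at this
          simp at h1
          omega
        rw [ih dw (off + (tw.length + 1)) hlen hdropnext]
        -- pvRuns groups the same run first
        have hruns : pvRuns (c :: suf) = (0, String.ofList (c :: tw)) :: pvRuns dw := by
          rw [pvRuns, pvGroups]
          rw [show (PySem.Chars.isdigit c) = true from hd]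
          have hTW : suf.takeWhile (fun d => PySem.Chars.isdigit d == true) = tw := by
            rw [htw]; simp
          have hDW : suf.dropWhile (fun d => PySem.Chars.isdigit d == true) = dw := by
            rw [hdw]; simp
          simp only [hTW, hDW, List.flatMap_cons]
          rw [pvRuns]
          rfl
        rw [hruns]
        -- the slice pkgver[i:e] is exactly the digit run, whether or not the run is final
        cases hdwc : dw with
        | nil =>
          have hcl : cs.length = off + (tw.length + 1) := by
            have h3 : (cs.drop off).length = cs.length - off := List.length_drop ..
            rw [hdropoff, hdwc] at h3
            simp at h3
            omega
          simp only [pvS]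
          rw [show cs.length - off = tw.length + 1 from by omega]
          rw [hdropoff, hdwc, List.append_nil]
          rw [List.take_of_length_le (by simp)]
        | cons r rs =>
          rw [pvS]
          rw [dropWhile_cons_false PySem.Chars.isdigit suf r rs (by rw [← hdw, hdwc])]
          simp only [Bool.and_false, Bool.false_eq_true, if_false, List.singleton_append]
          rw [show off + (tw.length + 1) - off = tw.length + 1 from by omega]
          rw [hdropoff, show tw.length + 1 = (c :: tw).length from by simp]
          rw [List.take_left]
      · -- single non-digit char
        have hdf : PySem.Chars.isdigit c = false := by simpa using hd
        rw [pvEmitB_cons, hget, hdf]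
        simp only [Bool.false_eq_true, if_false]
        have hdropnext : cs.drop (off + 1) = suf := by
          rw [← List.tail_drop, h2]
          rfl
        rw [ih suf (off + 1) (by simp at h1; omega) hdropnext]
        rw [runs_cons_nondigit c suf hdf]
        rfl

theorem tokens_eq (pv : List Char) :
    pvFlushA ((pv.foldl pvStepA ([], [])).1) ((pv.foldl pvStepA ([], [])).2)
      = pvEmitB pv (pvStartsB pv) := by
  rw [foldA_eq_pvTok pv [] [], List.nil_append, pvTok_nil_eq_runs]
  rw [starts_eq_pvS, emit_eq_runs pv pv.length pv 0 le_rfl rfl]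

-- ===== VERDICT (by name: the statement is the Claim_ definition above) =====
theorem parse_arch_version_spec : Claim_equal_parse_arch_version := by
  intro s _
  unfold Spec_parse_arch_version parse_arch_version parse_arch_version_alt
  rw [← epoch_eq]
  have hrel : pvRPartB = pvRelSplitA := rfl
  rw [hrel]
  cases pvEpochSplitA s.toList with
  | mk epoch cs =>
    cases pvRelSplitA cs with
    | mk pv rel =>
      simp only [Prod.mk.injEq, true_and, and_true]
      exact tokens_eq _
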